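-- pv_equiv track=rewrite | github.com/soloduev/WikiCode | WikiCode/apps/wiki/mymarkdown/mdsplit.py | cutLine
-- ===== SOURCE A (Python) =====
-- def cutLine(text):
--     line = ""
--     for ch in text:
--         if ch == '\n':
--             line += ch
--             break
--         else:
--             line += ch
--     return line
-- ===== SOURCE B (Python) =====
-- def cutLine(text):
--     before, sep, _ = text.partition('\n')
--     return before + sep
-- ===== Notes on version B (the rewrite author's own statement) =====
-- stated objective: idiomatic
-- what changed: Replaces the per-character accumulation loop with a single str.partition call on the newline separator, returning the part before the first newline plus the separator itself.
import Mathlib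
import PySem

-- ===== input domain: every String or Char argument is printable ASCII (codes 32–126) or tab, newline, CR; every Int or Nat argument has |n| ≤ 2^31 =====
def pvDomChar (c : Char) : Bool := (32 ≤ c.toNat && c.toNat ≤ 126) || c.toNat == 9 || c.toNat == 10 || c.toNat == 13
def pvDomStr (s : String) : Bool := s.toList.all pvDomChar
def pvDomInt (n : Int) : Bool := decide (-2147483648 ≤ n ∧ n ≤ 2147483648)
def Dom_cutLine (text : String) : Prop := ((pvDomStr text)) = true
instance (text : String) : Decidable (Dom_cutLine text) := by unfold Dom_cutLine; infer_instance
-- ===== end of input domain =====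

-- B replaces A's per-character accumulation loop with a single partition at the
-- first newline (idiomatic); return values proved equal on all of Dom.
-- ===== PORT A =====
-- literal port of A's loop: accumulate chars, stop after appending the first '\n'
def cutLineGo : List Char → List Char
  | [] => []
  | c :: cs => if c = '\n' then [c] else c :: cutLineGo cs

def cutLine (text : String) : String := String.mk (cutLineGo text.toList)

-- ===== PORT B =====
-- port of Source B: before, sep, _ = text.partition('\n'); return before + sep
-- (partition ported by hand over List Char: 'before' is the prefix up to the first
-- '\n', 'sep' is ['\n'] iff a newline occurs; exact for the 1-char separator '\n')
def cutLine_alt (text : String) : String :=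
  let l := text.toList
  let before := l.takeWhile (· ≠ '\n')
  let sep := if l.contains '\n' then ['\n'] else []
  String.mk (before ++ sep)

-- ===== PRECONDITION & SPEC =====
def Spec_cutLine (text : String) (out : String) : Prop := out = cutLine_alt text
instance (text : String) (out : String) : Decidable (Spec_cutLine text out) := by unfold Spec_cutLine; infer_instance

-- ===== CLAIM (what is proved, stated in full; the proofs are below) =====
def Claim_equal_cutLine : Prop := ∀ (text : String), Dom_cutLine text → Spec_cutLine text (cutLine text)

-- ===== LEMMAS AND PROOFS =====

-- ===== VERDICT (by name: the statement is the Claim_ definition above) =====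
lemma cutLineGo_eq (l : List Char) :
    cutLineGo l = l.takeWhile (· ≠ '\n') ++ (if l.contains '\n' then ['\n'] else []) := by
  induction l with
  | nil => simp [cutLineGo]
  | cons c cs ih =>
    by_cases h : c = '\n' <;>
      simp [cutLineGo, h, ih, List.takeWhile, eq_comm]

theorem cutLine_spec : Claim_equal_cutLine := by
  intro text _
  unfold Spec_cutLine cutLine cutLine_alt
  simp [cutLineGo_eq]
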